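-- pv_equiv track=rewrite | github.com/Wojti-7/logia | slowa.py | koduj
-- ===== SOURCE A (Python) =====
-- def koduj(k):
--     # k = 'alamakota'
--     d = list(k)
--     for i in range(0, len(d), 1):
--         x = d[i]
--         d[i] = (x, i)
--     d.sort()
--     for i in range(0, len(d), 1):
--         (x, y) = d[i]
--         d[i] = (y, x, i)
--     d.sort()
--     for i in range(0, len(d), 1):
--         (x, y, z) = d[i]
--         d[i] = (z)
--     return d
-- ===== SOURCE B (Python) =====
-- def koduj(k):
--     # counting-sort ranks: rank of char c at position i =
--     # (#chars < c in k) + (#occurrences of c before position i)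
--     cnt = {}
--     for ch in k:
--         cnt[ch] = cnt.get(ch, 0) + 1
--     offset = {}
--     total = 0
--     for ch in sorted(cnt):
--         offset[ch] = total
--         total += cnt[ch]
--     out = []
--     for ch in k:
--         out.append(offset[ch])
--         offset[ch] += 1
--     return out
-- ===== Notes on version B (the rewrite author's own statement) =====
-- stated objective: faster
-- what changed: replaced the two decorate-sort-undecorate passes over (char,index) tuples by a counting sort: a frequency dict, prefix-sum offsets over the sorted alphabet, and one sweep assigning each position its stable rank
import Mathlib
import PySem

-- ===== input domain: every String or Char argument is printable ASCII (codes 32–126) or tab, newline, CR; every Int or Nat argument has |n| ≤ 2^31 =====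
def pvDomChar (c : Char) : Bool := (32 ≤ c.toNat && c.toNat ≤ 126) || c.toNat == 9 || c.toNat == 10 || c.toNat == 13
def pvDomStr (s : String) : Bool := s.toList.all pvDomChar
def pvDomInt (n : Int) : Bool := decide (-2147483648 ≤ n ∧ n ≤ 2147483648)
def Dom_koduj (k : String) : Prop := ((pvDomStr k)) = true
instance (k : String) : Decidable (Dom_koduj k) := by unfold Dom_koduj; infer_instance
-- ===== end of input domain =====

-- B replaces A's two decorate-sort-undecorate passes by a counting sort (frequency dict,
-- prefix-sum offsets over the sorted alphabet, one sweep assigning stable ranks); objective: faster.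

-- ===== PORT A =====
-- d = list(k); d[i] = (d[i], i)
def kodujD1 (k : String) : List (Char × Int) :=
  (PySem.List.enumerate k.toList 0).map (fun p => (p.2, p.1))
-- d.sort()  (Python compares the (char, index) pairs lexicographically)
def kodujD2 (k : String) : List (Char × Int) :=
  PySem.List.sorted2 (kodujD1 k) (fun p => p.1) (fun p => p.2)
-- d[i] = (y, x, i)
def kodujD3 (k : String) : List (Int × Char × Int) :=
  (PySem.List.enumerate (kodujD2 k) 0).map (fun p => (p.2.2, p.2.1, p.1))
-- d.sort()  (triples (y, x, i); the first components y are pairwise distinct original indices,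
-- so Python's tuple comparison never reaches the third component: sorting on (y, x) is exact)
def kodujD4 (k : String) : List (Int × Char × Int) :=
  PySem.List.sorted2 (kodujD3 k) (fun t => t.1) (fun t => t.2.1)
-- d[i] = z
def koduj (k : String) : List Int :=
  (kodujD4 k).map (fun t => t.2.2)

-- ===== PORT B =====
-- cnt[ch] = cnt.get(ch, 0) + 1
def kodujCnt (k : String) : PySem.Dict Char Int :=
  k.toList.foldl (fun d ch => d.insert ch (d.getD ch 0 + 1)) PySem.Dict.empty
-- for ch in sorted(cnt): offset[ch] = total; total += cnt[ch]
-- (cnt[ch]: ch is always a key of cnt, so getD never uses its default)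
def kodujOff (k : String) : PySem.Dict Char Int × Int :=
  (PySem.List.sorted (kodujCnt k).keys (fun x => x)).foldl
    (fun st ch => (st.1.insert ch st.2, st.2 + (kodujCnt k).getD ch 0))
    (PySem.Dict.empty, 0)
-- for ch in k: out.append(offset[ch]); offset[ch] += 1
-- (offset[ch]: ch is always a key of offset, so getD never uses its default)
def koduj_alt (k : String) : List Int :=
  (k.toList.foldl
    (fun st ch => (st.1.insert ch (st.1.getD ch 0 + 1), st.2 ++ [st.1.getD ch 0]))
    ((kodujOff k).1, [])).2

-- ===== PRECONDITION & SPEC =====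
def Spec_koduj (k : String) (out : List Int) : Prop := out = koduj_alt k
instance (k : String) (out : List Int) : Decidable (Spec_koduj k out) := by unfold Spec_koduj; infer_instance

-- ===== CLAIM (what is proved, stated in full; the proofs are below) =====
def Claim_equal_koduj : Prop := ∀ (k : String), Dom_koduj k → Spec_koduj k (koduj k)

-- ===== LEMMAS AND PROOFS =====

-- the common target: stable rank of the char at each position, scanned left to right
def pvBase (cs : List Char) (c : Char) : Int := (cs.countP (fun x => decide (x < c)) : Int)

def pvGo (cs pre rest : List Char) : List Int :=
  match rest with
  | [] => []
  | c :: t => (pvBase cs c + (pre.count c : Int)) :: pvGo cs (pre ++ [c]) t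

def pvRank (k : String) (p : Char × Int) : Nat :=
  (kodujD1 k).countP (fun q => decide (toLex q < toLex p))

-- sorted2 is sorted with the lexicographic key
theorem sorted2_eq_sorted_lex {α κ₁ κ₂ : Type} [LinearOrder κ₁] [LinearOrder κ₂]
    (xs : List α) (k1 : α → κ₁) (k2 : α → κ₂) :
    PySem.List.sorted2 xs k1 k2 = PySem.List.sorted xs (fun x => toLex (k1 x, k2 x)) := by
  unfold PySem.List.sorted2 PySem.List.sorted
  simp only [if_neg, Bool.false_eq_true, not_false_iff]
  congr 1
  funext acc x
  congr 1
  funext a b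
  rcases lt_trichotomy (k1 a) (k1 b) with h | h | h
  · simp [Prod.Lex.lt_iff, h]
  · simp [Prod.Lex.lt_iff, h]
  · simp [Prod.Lex.lt_iff, h, lt_asymm h, ne_of_gt h]

-- position in a strictly increasing list = number of strictly smaller keys
theorem countP_lt_of_pairwise {α κ : Type} [LinearOrder κ] (K : α → κ) :
    ∀ (l : List α), l.Pairwise (fun a b => K a < K b) →
    ∀ (r : Nat) (h : r < l.length),
      l.countP (fun q => decide (K q < K l[r])) = r := by
  intro l
  induction l with
  | nil => intro _ r h; simp at h
  | cons a t ih =>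
    intro hp r h
    rcases List.pairwise_cons.mp hp with ⟨ha, ht⟩
    cases r with
    | zero =>
      apply List.countP_eq_zero.mpr
      intro q hq
      simp only [List.getElem_cons_zero, decide_eq_true_eq]
      rcases List.mem_cons.mp hq with rfl | hq
      · exact lt_irrefl _
      · exact not_lt.mpr (le_of_lt (ha q hq))
    | succ r =>
      have hr : r < t.length := by simpa using h
      have hKa : K a < K (t[r]) := ha _ (t.getElem_mem hr)
      rw [List.countP_cons]
      simp only [List.getElem_cons_succ]
      simp only [hKa, decide_true, if_pos]
      exact congrArg (· + 1) (ih ht r hr)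

-- counting lexicographically smaller (index, char) pairs = smaller chars + earlier equal chars
theorem countP_enumerate_lex (c : Char) :
    ∀ (cs : List Char) (s i : Int),
      (PySem.List.enumerate cs s).countP (fun p => decide (p.2 < c ∨ (p.2 = c ∧ p.1 < i)))
        = cs.countP (fun x => decide (x < c)) + (cs.take (i - s).toNat).count c := by
  intro cs
  induction cs with
  | nil => intro s i; simp [PySem.List.enumerate_nil]
  | cons d t ih =>
    intro s i
    rw [PySem.List.enumerate_cons, List.countP_cons, List.countP_cons, ih (s + 1) i]
    rcases le_or_gt i s with hle | hlt
    · have h1 : (i - s).toNat = 0 := by omega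
      have h2 : (i - (s + 1)).toNat = 0 := by omega
      have h3 : ¬ s < i := not_lt.mpr hle
      simp [h1, h2, h3]
    · have h1 : (i - s).toNat = (i - (s + 1)).toNat + 1 := by omega
      rw [h1, List.take_succ_cons, List.count_cons]
      by_cases hdc : d < c
      · have hne : ¬ d = c := ne_of_lt hdc
        simp [hdc, hne]
        omega
      · by_cases hde : d = c
        · simp [hde, hlt]
          omega
        · simp [hdc, hde]

theorem pvGo_eq_map (cs : List Char) :
    ∀ (rest pre : List Char),
      pvGo cs pre rest
        = (PySem.List.enumerate rest (pre.length : Int)).map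
            (fun p => pvBase cs p.2 + (((pre ++ rest).take p.1.toNat).count p.2 : Int)) := by
  intro rest
  induction rest with
  | nil => intro pre; simp [pvGo, PySem.List.enumerate_nil]
  | cons c t ih =>
    intro pre
    rw [pvGo, PySem.List.enumerate_cons, List.map_cons]
    congr 1
    · have h1 : ((pre.length : Int)).toNat = pre.length := by omega
      have h2 : (pre ++ c :: t).take pre.length = pre := by
        exact List.take_left (l₁ := pre) (l₂ := c :: t)
      simp [h1, h2]
    · rw [ih (pre ++ [c])]
      have h3 : ((pre ++ [c]).length : Int) = (pre.length : Int) + 1 := by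
        simp
      have h4 : (pre ++ [c]) ++ t = pre ++ c :: t := by simp
      rw [h3, h4]

-- A: decorate-sort-undecorate assigns exactly the stable ranks
theorem kodujA_eq (k : String) : koduj k = pvGo k.toList [] k.toList := by
  have hd2 : kodujD2 k = PySem.List.sorted (kodujD1 k) (fun p => toLex (p.1, p.2)) :=
    sorted2_eq_sorted_lex _ _ _
  have henum_nodup : (PySem.List.enumerate k.toList 0).Nodup :=
    (PySem.List.pairwise_lt_enumerate k.toList 0).imp
      (fun hab => by intro he; rw [he] at hab; exact lt_irrefl _ hab)
  have h1nodup : ((kodujD1 k).map (fun p => toLex (p.1, p.2))).Nodup := by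
    unfold kodujD1
    rw [List.map_map]
    refine List.pairwise_map.mpr ((PySem.List.pairwise_lt_enumerate k.toList 0).imp ?_)
    intro p q hlt heq
    have h2 : ((p.2, p.1) : Char × Int) = (q.2, q.1) := toLex.injective heq
    have h3 : p.1 = q.1 := congrArg Prod.snd h2
    rw [h3] at hlt; exact lt_irrefl _ hlt
  have hperm2 : (kodujD2 k).Perm (kodujD1 k) := by
    rw [hd2]; exact PySem.List.sorted_perm _ _ _
  have hpair2 : (kodujD2 k).Pairwise (fun a b => toLex (a.1, a.2) < toLex (b.1, b.2)) := by
    have hle := PySem.List.sorted_pairwise (kodujD1 k) (fun p => toLex (p.1, p.2))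
    rw [← hd2] at hle
    have hnd : ((kodujD2 k).map (fun p => toLex (p.1, p.2))).Nodup :=
      ((hperm2.map _).nodup_iff).mpr h1nodup
    have hne : (kodujD2 k).Pairwise (fun a b => toLex (a.1, a.2) ≠ toLex (b.1, b.2)) :=
      List.pairwise_map.mp hnd
    exact (hle.and hne).imp (fun h => lt_of_le_of_ne h.1 h.2)
  have hrank : ∀ (r : Nat) (h : r < (kodujD2 k).length), pvRank k ((kodujD2 k)[r]) = r := by
    intro r h
    unfold pvRank
    rw [List.Perm.countP_eq _ hperm2.symm]
    exact countP_lt_of_pairwise (fun p => toLex (p.1, p.2)) _ hpair2 r h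
  have hd3 : kodujD3 k = (kodujD2 k).map (fun p => (p.2, p.1, (pvRank k p : Int))) := by
    unfold kodujD3
    apply List.ext_getElem
    · simp [PySem.List.length_enumerate]
    · intro r h1 h2
      have hr : r < (kodujD2 k).length := by simpa using h2
      rw [List.getElem_map, List.getElem_map, PySem.List.getElem_enumerate]
      rw [hrank r hr]
      simp
  have hperm3 : ((kodujD1 k).map (fun p => (p.2, p.1, (pvRank k p : Int)))).Perm (kodujD3 k) := by
    rw [hd3]; exact (hperm2.map _).symm
  have hpair3 : ((kodujD1 k).map (fun p => (p.2, p.1, (pvRank k p : Int)))).Pairwise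
      (fun a b => toLex (a.1, a.2.1) < toLex (b.1, b.2.1)) := by
    unfold kodujD1
    rw [List.map_map]
    refine List.pairwise_map.mpr ((PySem.List.pairwise_lt_enumerate k.toList 0).imp ?_)
    intro p q hlt
    exact Prod.Lex.lt_iff.mpr (Or.inl hlt)
  have hd4 : kodujD4 k = (kodujD1 k).map (fun p => (p.2, p.1, (pvRank k p : Int))) := by
    unfold kodujD4
    rw [sorted2_eq_sorted_lex]
    exact PySem.List.sorted_eq_of_perm_of_pairwise_lt _ _ _ hperm3 hpair3
  unfold koduj
  rw [hd4, List.map_map]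
  rw [pvGo_eq_map k.toList k.toList []]
  unfold kodujD1
  rw [List.map_map]
  simp only [List.length_nil, Nat.cast_zero, List.nil_append]
  apply List.map_congr_left
  intro p hp
  simp only [Function.comp]
  have hpr : pvRank k (p.2, p.1)
      = k.toList.countP (fun x => decide (x < p.2)) + (k.toList.take (p.1 - 0).toNat).count p.2 := by
    unfold pvRank kodujD1
    rw [List.countP_map]
    rw [List.countP_congr (q := fun q : Int × Char => decide (q.2 < p.2 ∨ (q.2 = p.2 ∧ q.1 < p.1)))
      (by intro x hx; simp [Prod.Lex.lt_iff])]
    exact countP_enumerate_lex p.2 k.toList 0 p.1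
  rw [hpr]
  unfold pvBase
  push_cast
  simp

-- keys not in the loop's list keep their value
theorem off_getD_not_mem (g : Char → Int) :
    ∀ (l : List Char) (d : PySem.Dict Char Int) (t0 : Int) (c : Char), c ∉ l →
      ((l.foldl (fun st ch => (st.1.insert ch st.2, st.2 + g ch)) (d, t0)).1).getD c 0
        = d.getD c 0 := by
  intro l
  induction l with
  | nil => intro d t0 c _; rfl
  | cons a t ih =>
    intro d t0 c hc
    rw [List.foldl_cons]
    rw [ih _ _ _ (fun h => hc (List.mem_cons_of_mem a h))]
    exact PySem.Dict.getD_insert_of_ne _ _ _ (fun h => hc (by rw [h]; exact List.mem_cons_self ..))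

-- the offsets loop stores the running total, i.e. the sum over strictly smaller keys
theorem off_getD (g : Char → Int) :
    ∀ (l : List Char), l.Pairwise (· < ·) →
    ∀ (d : PySem.Dict Char Int) (t0 : Int) (c : Char), c ∈ l →
      ((l.foldl (fun st ch => (st.1.insert ch st.2, st.2 + g ch)) (d, t0)).1).getD c 0
        = t0 + ((l.filter (fun x => decide (x < c))).map g).sum := by
  intro l
  induction l with
  | nil => intro _ d t0 c hc; simp at hc
  | cons a t ih =>
    intro hp d t0 c hc
    rcases List.pairwise_cons.mp hp with ⟨ha, ht⟩
    rw [List.foldl_cons]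
    rcases List.mem_cons.mp hc with rfl | hct
    · have hnt : c ∉ t := fun h => lt_irrefl _ (ha c h)
      rw [off_getD_not_mem g t _ _ _ hnt]
      rw [PySem.Dict.getD_insert_self]
      have hf : (c :: t).filter (fun x => decide (x < c)) = [] := by
        rw [List.filter_eq_nil_iff]
        intro x hx
        simp only [decide_eq_true_eq]
        rcases List.mem_cons.mp hx with rfl | hxt
        · exact lt_irrefl _
        · exact not_lt.mpr (le_of_lt (ha x hxt))
      rw [hf]; simp
    · rw [ih ht _ _ _ hct]
      have hac : a < c := ha c hct
      rw [List.filter_cons_of_pos (by simpa using hac)]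
      rw [List.map_cons, List.sum_cons]
      ring

theorem countP_split (l : List Char) (p q : Char → Bool) :
    l.countP p = l.countP (fun x => p x && q x) + l.countP (fun x => p x && !q x) := by
  induction l with
  | nil => simp
  | cons a t ih =>
    simp only [List.countP_cons]
    cases hp : p a <;> cases hq : q a <;> simp_all <;> omega

-- a sum of per-character counts over distinct characters is a countP
theorem sum_counts_eq_countP (cs : List Char) :
    ∀ (S : List Char) (p : Char → Bool), S.Nodup →
      (∀ x ∈ cs, p x = true → x ∈ S) → (∀ x ∈ S, p x = true) →
      (S.map (fun c => (cs.count c : Int))).sum = (cs.countP p : Int) := by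
  intro S
  induction S with
  | nil =>
    intro p _ h2 _
    have : cs.countP p = 0 := List.countP_eq_zero.mpr (fun x hx hpx => by simpa using h2 x hx hpx)
    simp [this]
  | cons a T ih =>
    intro p hnd h2 h3
    have hpa : p a = true := h3 a (List.mem_cons_self ..)
    have hnd' : T.Nodup := (List.nodup_cons.mp hnd).2
    have hanT : a ∉ T := (List.nodup_cons.mp hnd).1
    have hsplit := countP_split cs p (fun x => x == a)
    have hca : cs.countP (fun x => p x && (x == a)) = cs.count a := by
      rw [List.count_eq_countP]
      apply List.countP_congr
      intro x _
      constructor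
      · intro h; exact (by simpa using h : p x = true ∧ (x == a) = true).2
      · intro h
        have hxa : x = a := by simpa using h
        subst hxa
        simp [hpa]
    have hrec := ih (fun x => p x && !(x == a)) hnd'
      (by
        intro x hx hpx
        obtain ⟨hp1, hp2⟩ := by simpa using hpx
        have hxa : x ≠ a := by simpa using hp2
        rcases List.mem_cons.mp (h2 x hx hp1) with rfl | h
        · exact absurd rfl hxa
        · exact h)
      (by
        intro x hxT
        have hxa : x ≠ a := fun h => hanT (h ▸ hxT)
        simp [h3 x (List.mem_cons_of_mem a hxT), hxa])
    rw [List.map_cons, List.sum_cons, hrec, hsplit, hca]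
    push_cast
    ring

-- the output sweep: offsets hold base + prefix count, each step emits one rank
theorem loopB (cs : List Char) :
    ∀ (rest pre : List Char) (off : PySem.Dict Char Int) (out : List Int),
      (∀ c ∈ rest, off.getD c 0 = pvBase cs c + (pre.count c : Int)) →
      (rest.foldl (fun st ch => (st.1.insert ch (st.1.getD ch 0 + 1), st.2 ++ [st.1.getD ch 0]))
        (off, out)).2 = out ++ pvGo cs pre rest := by
  intro rest
  induction rest with
  | nil => intro pre off out _; simp [pvGo]
  | cons ch t ih =>
    intro pre off out h
    rw [List.foldl_cons]
    rw [ih (pre ++ [ch]) _ _ ?_]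
    · rw [pvGo]
      rw [h ch (List.mem_cons_self ..)]
      simp
    · intro c hct
      by_cases hc : c = ch
      · subst hc
        rw [PySem.Dict.getD_insert_self]
        rw [h c (List.mem_cons_of_mem c hct)]
        rw [List.count_append]
        simp
        ring
      · rw [PySem.Dict.getD_insert_of_ne _ _ _ hc]
        rw [h c (List.mem_cons_of_mem ch hct)]
        rw [List.count_append]
        have : [ch].count c = 0 := by simp [List.count_singleton]; exact fun h' => hc h'.symm
        simp [this]

-- B: counting sort assigns exactly the stable ranks
theorem kodujB_eq (k : String) : koduj_alt k = pvGo k.toList [] k.toList := by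
  have hcnt : kodujCnt k = PySem.Dict.counter k.toList := by
    unfold kodujCnt
    exact PySem.Dict.foldl_insert_getD_add_one_eq_counter k.toList
  have hkeys : (kodujCnt k).keys = PySem.Set.ofList k.toList := by
    rw [hcnt]; exact PySem.Dict.keys_counter k.toList
  have hpairk : (PySem.List.sorted (kodujCnt k).keys (fun x => x)).Pairwise (· < ·) := by
    rw [hkeys]; exact PySem.List.sorted_ofList_pairwise_lt k.toList
  have hmemk : ∀ x, x ∈ PySem.List.sorted (kodujCnt k).keys (fun x => x) ↔ x ∈ k.toList := by
    intro x
    rw [PySem.List.mem_sorted, hkeys, PySem.Set.mem_ofList]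
  have hoff : ∀ c ∈ k.toList, (kodujOff k).1.getD c 0 = pvBase k.toList c + (([] : List Char).count c : Int) := by
    intro c hc
    unfold kodujOff
    rw [off_getD _ _ hpairk _ _ _ ((hmemk c).mpr hc)]
    have hmap : ∀ x ∈ (PySem.List.sorted (kodujCnt k).keys (fun x => x)).filter (fun x => decide (x < c)),
        (kodujCnt k).getD x 0 = (k.toList.count x : Int) := by
      intro x _
      rw [hcnt]; exact PySem.Dict.getD_counter k.toList x
    rw [List.map_congr_left hmap]
    rw [sum_counts_eq_countP k.toList _ (fun x => decide (x < c))
      (List.Nodup.filter _ (hpairk.imp (fun h => ne_of_lt h)))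
      (by
        intro x hx hpx
        exact List.mem_filter.mpr ⟨(hmemk x).mpr hx, hpx⟩)
      (fun x hx => (List.mem_filter.mp hx).2)]
    unfold pvBase
    simp
  unfold koduj_alt
  rw [loopB k.toList k.toList [] _ _ hoff]
  simp

-- ===== VERDICT (by name: the statement is the Claim_ definition above) =====
theorem koduj_spec : Claim_equal_koduj := by
  intro k _
  unfold Spec_koduj
  rw [kodujA_eq, kodujB_eq]
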